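-- pv_equiv track=rewrite | github.com/akikuno/DAJIN2 | src/DAJIN2/utils/cssplits_handler.py | highlight_sv_deletions
-- ===== SOURCE A (Python) =====
-- def highlight_sv_deletions(misdv_sv_allele: list[str]) -> list[str]:
--     """Annotate start and end poisition at the SV deletions."""
--     sv_deletions = []
--     idx = 0
--     while idx < len(misdv_sv_allele):
--         midsv_tag = misdv_sv_allele[idx]
--
--         if midsv_tag.startswith("-"):
--             sv_deletions.append("!START_OF_DEL_ALLELE!")
--             sv_deletions.append(misdv_sv_allele[idx])
--             # Enclose consecutive deletions within a single span.
--             while idx < len(misdv_sv_allele) - 1 and misdv_sv_allele[idx + 1].startswith("-"):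
--                 sv_deletions.append(misdv_sv_allele[idx + 1])
--                 idx += 1
--             sv_deletions.append("!END_OF_DEL_ALLELE!")
--         # No SV
--         else:
--             sv_deletions.append(midsv_tag)
--
--         idx += 1
--
--     return sv_deletions
-- ===== SOURCE B (Python) =====
-- def highlight_sv_deletions(misdv_sv_allele: list[str]) -> list[str]:
--     """Annotate start and end position at the SV deletions (flat one-pass state machine)."""
--     out = []
--     in_deletion = False
--     for tag in misdv_sv_allele:
--         if tag.startswith("-"):
--             if not in_deletion:
--                 out.append("!START_OF_DEL_ALLELE!")
--                 in_deletion = True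
--             out.append(tag)
--         else:
--             if in_deletion:
--                 out.append("!END_OF_DEL_ALLELE!")
--                 in_deletion = False
--             out.append(tag)
--     if in_deletion:
--         out.append("!END_OF_DEL_ALLELE!")
--     return out
-- ===== Notes on version B (the rewrite author's own statement) =====
-- stated objective: simpler
-- what changed: Replaced the index-based outer while with a nested consuming inner while by a single flat for-loop state machine carrying an in_deletion flag, emitting the END marker on the first non-deletion tag or after the loop.
import Mathlib
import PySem

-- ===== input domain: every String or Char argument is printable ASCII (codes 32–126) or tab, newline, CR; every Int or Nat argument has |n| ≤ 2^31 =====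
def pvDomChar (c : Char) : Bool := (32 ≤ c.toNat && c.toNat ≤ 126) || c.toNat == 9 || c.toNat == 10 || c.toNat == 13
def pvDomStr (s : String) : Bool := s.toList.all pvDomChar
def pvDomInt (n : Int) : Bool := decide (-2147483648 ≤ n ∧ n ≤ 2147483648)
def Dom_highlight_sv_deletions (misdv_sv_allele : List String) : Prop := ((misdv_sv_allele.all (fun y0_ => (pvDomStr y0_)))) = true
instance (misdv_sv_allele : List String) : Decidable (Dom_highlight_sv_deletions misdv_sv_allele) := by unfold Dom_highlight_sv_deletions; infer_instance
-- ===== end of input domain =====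

-- B replaces A's nested consuming inner while-loop by a single flat pass with an in_deletion flag (simpler decomposition).


-- ===== PORT A =====
-- Inner while-loop of A: consumes the leading "-"-tags of the remaining list,
-- returning (tags appended by the inner loop, remaining tags after them).
def pvInnerA : List String → (List String × List String)
  | [] => ([], [])
  | x :: xs =>
    if PySem.Str.startswith x "-" then
      let p := pvInnerA xs
      (x :: p.1, p.2)
    else ([], x :: xs)

theorem pvInnerA_len (xs : List String) : (pvInnerA xs).2.length ≤ xs.length := by
  induction xs with
  | nil => simp [pvInnerA]
  | cons x xs ih =>
    simp only [pvInnerA]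
    split
    · exact Nat.le_trans ih (Nat.le_succ _)
    · simp

def highlight_sv_deletions : List String → List String
  | [] => []
  | midsv_tag :: rest =>
    if PySem.Str.startswith midsv_tag "-" then
      let p := pvInnerA rest
      "!START_OF_DEL_ALLELE!" :: midsv_tag ::
        (p.1 ++ "!END_OF_DEL_ALLELE!" :: highlight_sv_deletions p.2)
    else midsv_tag :: highlight_sv_deletions rest
termination_by xs => xs.length
decreasing_by
  · exact Nat.lt_succ_of_le (pvInnerA_len rest)
  · simp

-- ===== PORT B =====
-- Flat single pass carrying the in_deletion flag.
def pvAltLoop (flag : Bool) : List String → List String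
  | [] => if flag then ["!END_OF_DEL_ALLELE!"] else []
  | tag :: rest =>
    if PySem.Str.startswith tag "-" then
      if flag then tag :: pvAltLoop true rest
      else "!START_OF_DEL_ALLELE!" :: tag :: pvAltLoop true rest
    else
      if flag then "!END_OF_DEL_ALLELE!" :: tag :: pvAltLoop false rest
      else tag :: pvAltLoop false rest

def highlight_sv_deletions_alt (misdv_sv_allele : List String) : List String :=
  pvAltLoop false misdv_sv_allele

-- ===== PRECONDITION & SPEC =====
def Spec_highlight_sv_deletions (misdv_sv_allele : List String) (out : List String) : Prop := out = highlight_sv_deletions_alt misdv_sv_allele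
instance (misdv_sv_allele : List String) (out : List String) : Decidable (Spec_highlight_sv_deletions misdv_sv_allele out) := by unfold Spec_highlight_sv_deletions; infer_instance

-- ===== CLAIM (what is proved, stated in full; the proofs are below) =====
def Claim_equal_highlight_sv_deletions : Prop := ∀ (misdv_sv_allele : List String), Dom_highlight_sv_deletions misdv_sv_allele → Spec_highlight_sv_deletions misdv_sv_allele (highlight_sv_deletions misdv_sv_allele)

-- ===== LEMMAS AND PROOFS =====
-- With the flag up, B emits exactly what A's inner loop emits, then the END
-- marker, then continues with the flag down on the remainder.
theorem pvAltLoop_true (xs : List String) :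
    pvAltLoop true xs = (pvInnerA xs).1 ++ "!END_OF_DEL_ALLELE!" :: pvAltLoop false (pvInnerA xs).2 := by
  induction xs with
  | nil => simp [pvAltLoop, pvInnerA]
  | cons x xs ih =>
    by_cases h : PySem.Chars.startswith x.toList ['-'] = true <;>
      simp [pvAltLoop, pvInnerA, h, ih]

theorem pvA_eq_alt (xs : List String) :
    highlight_sv_deletions xs = pvAltLoop false xs := by
  induction xs using highlight_sv_deletions.induct with
  | case1 => simp [highlight_sv_deletions, pvAltLoop]
  | case2 t rest h p ih =>
    replace h : PySem.Chars.startswith t.toList "-".toList = true := h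
    simp only [highlight_sv_deletions, pvAltLoop, PySem.Str.startswith_eq, pvAltLoop_true]
    rw [if_pos h, if_pos h]
    have ih' : highlight_sv_deletions (pvInnerA rest).2 = pvAltLoop false (pvInnerA rest).2 := ih
    simp [ih']
  | case3 t rest h ih =>
    replace h : ¬ PySem.Chars.startswith t.toList "-".toList = true := h
    simp only [highlight_sv_deletions, pvAltLoop, PySem.Str.startswith_eq]
    rw [if_neg h, if_neg h]
    exact congrArg _ ih

-- ===== VERDICT (by name: the statement is the Claim_ definition above) =====
theorem highlight_sv_deletions_spec : Claim_equal_highlight_sv_deletions := by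
  intro xs _
  unfold Spec_highlight_sv_deletions highlight_sv_deletions_alt
  exact pvA_eq_alt xs
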